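-- pv_equiv track=rewrite | github.com/hacker7pro/packet-crafter | phy_builder.py | apply_mlt3
-- ===== SOURCE A (Python) =====
-- def apply_mlt3(codes_5b: list[int]) -> list[int]:
--     levels: list[int] = []; state = 0
--     cycle = [0, 1, 0, -1]
--     for code in codes_5b:
--         for bit_pos in range(4, -1, -1):
--             levels.append(cycle[state])
--             if (code >> bit_pos) & 1: state = (state + 1) % 4
--     return levels
-- ===== SOURCE B (Python) =====
-- def apply_mlt3(codes_5b: list[int]) -> list[int]:
--     # flatten -> exclusive prefix count of 1-bits -> cycle lookup
--     bits = [(code >> p) & 1 for code in codes_5b for p in range(4, -1, -1)]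
--     prefix = [0]
--     for b in bits:
--         prefix.append(prefix[-1] + b)
--     cycle = (0, 1, 0, -1)
--     return [cycle[s % 4] for s in prefix[:-1]]
-- ===== Notes on version B (the rewrite author's own statement) =====
-- stated objective: alternative
-- what changed: A's fused nested loop that mutates a mod-4 state while appending is replaced by a three-stage pipeline: flatten codes to an MSB-first bit list, take the exclusive prefix sum of 1-bits, and map each prefix count through the 4-entry MLT-3 cycle table.
import Mathlib
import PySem

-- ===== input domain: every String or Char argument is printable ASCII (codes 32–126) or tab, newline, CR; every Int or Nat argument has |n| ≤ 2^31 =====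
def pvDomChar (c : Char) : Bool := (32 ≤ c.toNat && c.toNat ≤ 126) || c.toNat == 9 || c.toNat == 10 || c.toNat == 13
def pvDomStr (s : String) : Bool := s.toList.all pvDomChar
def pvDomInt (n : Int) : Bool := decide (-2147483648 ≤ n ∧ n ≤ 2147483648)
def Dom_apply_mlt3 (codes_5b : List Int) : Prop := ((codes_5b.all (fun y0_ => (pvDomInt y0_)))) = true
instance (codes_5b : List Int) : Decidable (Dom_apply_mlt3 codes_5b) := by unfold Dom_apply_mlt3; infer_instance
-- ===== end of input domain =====

-- B replaces A's fused mutate-and-append loop by a flatten → exclusive-prefix-scan → cycle-lookup pipeline (objective: alternative decomposition, same cost).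

-- Python's '(x >> p) & 1': '>>' is Lean's '>>>' (arithmetic shift, also on negatives; p ∈ [0,4] so '.toNat' is exact),
-- and '& 1' is ported as 'PySem.Int.mod _ 2' ('x & 1 == x % 2' for every Python int, two's complement; exact).

-- ===== PORT A =====
-- 'cycle[state]' is ported as pyGet? … getD 0; state is always in 0..3 so the lookup never misses.
def apply_mlt3 (codes_5b : List Int) : List Int :=
  let cycle : List Int := [0, 1, 0, -1]
  (codes_5b.foldl (fun (q : List Int × Int) code =>
      (PySem.List.pyRange 4 (-1) (-1)).foldl (fun (r : List Int × Int) bit_pos =>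
        let levels := r.1 ++ [(PySem.List.pyGet? cycle r.2).getD 0]
        if PySem.Int.mod (code >>> (bit_pos.toNat : Int)) 2 ≠ 0 then (levels, (r.2 + 1) % 4) else (levels, r.2))
        q)
    ([], 0)).1

-- ===== PORT B =====
-- 's % 4': Lean's Int '%' (emod) agrees with Python's for the positive divisor 4; s ≥ 0 so the lookup never misses.
def apply_mlt3_alt (codes_5b : List Int) : List Int :=
  let bits := codes_5b.flatMap (fun code =>
    (PySem.List.pyRange 4 (-1) (-1)).map (fun p => PySem.Int.mod (code >>> (p.toNat : Int)) 2))
  let pre := List.scanl (· + ·) 0 bits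
  pre.dropLast.map (fun s => ((PySem.List.pyGet? ([0, 1, 0, -1] : List Int) (s % 4)).getD 0))

-- ===== PRECONDITION & SPEC =====
def Spec_apply_mlt3 (codes_5b : List Int) (out : List Int) : Prop := out = apply_mlt3_alt codes_5b
instance (codes_5b : List Int) (out : List Int) : Decidable (Spec_apply_mlt3 codes_5b out) := by unfold Spec_apply_mlt3; infer_instance

-- ===== CLAIM (what is proved, stated in full; the proofs are below) =====
def Claim_equal_apply_mlt3 : Prop := ∀ (codes_5b : List Int), Dom_apply_mlt3 codes_5b → Spec_apply_mlt3 codes_5b (apply_mlt3 codes_5b)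

-- ===== LEMMAS AND PROOFS =====

/-- the level emitted from cumulative 1-bit count `s` -/
def pvCyc (s : Int) : Int := (PySem.List.pyGet? ([0, 1, 0, -1] : List Int) (s % 4)).getD 0

/-- reference run: emit the level for the running count, then add the bit -/
def pvRun (s : Int) : List Int → List Int
  | [] => []
  | b :: bs => pvCyc s :: pvRun (s + b) bs

def pvBits5 (code : Int) : List Int :=
  (PySem.List.pyRange 4 (-1) (-1)).map (fun p => PySem.Int.mod (code >>> (p.toNat : Int)) 2)

/-- one step of A's inner loop, with the bit already computed -/
def pvStepA (r : List Int × Int) (b : Int) : List Int × Int :=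
  let levels := r.1 ++ [(PySem.List.pyGet? ([0, 1, 0, -1] : List Int) r.2).getD 0]
  if b ≠ 0 then (levels, (r.2 + 1) % 4) else (levels, r.2)

theorem pvRun_append (s : Int) (xs ys : List Int) :
    pvRun s (xs ++ ys) = pvRun s xs ++ pvRun (s + xs.sum) ys := by
  induction xs generalizing s with
  | nil => simp [pvRun]
  | cons b bs ih => simp [pvRun, ih, add_assoc]

/-- A's inner bit loop, over an explicit bit list. -/
theorem pvFoldA (bs : List Int) (hbs : ∀ b ∈ bs, b = 0 ∨ b = 1) (acc : List Int) (s : Int) :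
    bs.foldl pvStepA (acc, s % 4) = (acc ++ pvRun s bs, (s + bs.sum) % 4) := by
  induction bs generalizing acc s with
  | nil => simp [pvRun]
  | cons b bs ih =>
    have hb := hbs b (List.mem_cons_self ..)
    have hrest := fun b hb => hbs b (List.mem_cons_of_mem _ hb)
    rcases hb with hb | hb
    · subst hb
      have h0 : pvStepA (acc, s % 4) 0 = (acc ++ [pvCyc s], s % 4) := by
        simp [pvStepA, pvCyc]
      rw [List.foldl_cons, h0, ih hrest]
      simp [pvRun, List.append_assoc]
    · subst hb
      have h1 : pvStepA (acc, s % 4) 1 = (acc ++ [pvCyc s], (s + 1) % 4) := by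
        simp [pvStepA, pvCyc]
      rw [List.foldl_cons, h1, ih hrest]
      simp [pvRun, List.append_assoc, List.sum_cons]
      omega

theorem pvBits5_bin (code : Int) : ∀ b ∈ pvBits5 code, b = 0 ∨ b = 1 := by
  intro b hb
  rcases List.mem_map.1 hb with ⟨p, _, rfl⟩
  exact PySem.Int.mod_two_eq _

theorem pvA_eq_run (codes : List Int) :
    apply_mlt3 codes = pvRun 0 (codes.flatMap pvBits5) := by
  have hfun : apply_mlt3 codes
      = (codes.foldl (fun (q : List Int × Int) code =>
          (PySem.List.pyRange 4 (-1) (-1)).foldl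
            (fun r p => pvStepA r (PySem.Int.mod (code >>> (p.toNat : Int)) 2)) q)
        ([], 0)).1 := rfl
  rw [hfun]
  clear hfun
  suffices h : ∀ acc s,
      codes.foldl (fun (q : List Int × Int) code =>
          (PySem.List.pyRange 4 (-1) (-1)).foldl
            (fun r p => pvStepA r (PySem.Int.mod (code >>> (p.toNat : Int)) 2)) q)
        (acc, s % 4)
      = (acc ++ pvRun s (codes.flatMap pvBits5), (s + (codes.flatMap pvBits5).sum) % 4) by
    have := congrArg Prod.fst (h [] 0)
    simpa using this
  induction codes with
  | nil => intro acc s; simp [pvRun]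
  | cons c cs ih =>
    intro acc s
    have hmap : (PySem.List.pyRange 4 (-1) (-1)).foldl
          (fun r p => pvStepA r (PySem.Int.mod (c >>> (p.toNat : Int)) 2)) (acc, s % 4)
        = (pvBits5 c).foldl pvStepA (acc, s % 4) := by
      unfold pvBits5
      rw [List.foldl_map]
    rw [List.foldl_cons, hmap, pvFoldA (pvBits5 c) (pvBits5_bin c) acc s,
      ih (acc ++ pvRun s (pvBits5 c)) (s + (pvBits5 c).sum)]
    simp [pvRun_append, List.append_assoc, add_assoc]

theorem pvB_eq_run (bits : List Int) (s : Int) :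
    (List.scanl (· + ·) s bits).dropLast.map pvCyc = pvRun s bits := by
  induction bits generalizing s with
  | nil => simp [pvRun]
  | cons b bs ih =>
    rw [List.scanl_cons, List.dropLast_cons_of_ne_nil (by simp), List.map_cons, ih]
    rfl

-- ===== VERDICT (by name: the statement is the Claim_ definition above) =====
theorem apply_mlt3_spec : Claim_equal_apply_mlt3 := by
  intro codes _
  unfold Spec_apply_mlt3
  rw [pvA_eq_run]
  unfold apply_mlt3_alt
  simp only
  rw [show (fun s : Int => ((PySem.List.pyGet? ([0,1,0,-1] : List Int) (s % 4)).getD 0)) = pvCyc from rfl]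
  rw [pvB_eq_run]
  rfl
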